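-- pv_equiv track=rewrite | github.com/bartkowiaktomasz/algorithmic-challenges | HackerRank - Interview Preparation Kit/String Manipulation/Strings_MakingAnagrams.py | numSameLetters
-- ===== SOURCE A (Python) =====
-- def numSameLetters(str1, str2):
--     dict = {}
--     numSame = 0
--     for char in str1:
--         if char not in dict:
--             dict[char] = 1
--         else:
--             dict[char] += 1
--
--     for char in str2:
--         if char in dict and dict[char] > 0:
--             numSame += 1
--             dict[char] += -1
--
--     return numSame
-- ===== SOURCE B (Python) =====
-- def numSameLetters(str1, str2):
--     count1 = {}
--     for ch in str1:
--         count1[ch] = count1.get(ch, 0) + 1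
--     count2 = {}
--     for ch in str2:
--         count2[ch] = count2.get(ch, 0) + 1
--     total = 0
--     for ch in count1:
--         total += min(count1[ch], count2.get(ch, 0))
--     return total
-- ===== Notes on version B (the rewrite author's own statement) =====
-- stated objective: simpler
-- what changed: Replaces A's streaming match-and-decrement scan of str2 against a mutated dictionary by two independent frequency tables and a sum of min(count1, count2) over the distinct characters of str1.
import Mathlib
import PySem

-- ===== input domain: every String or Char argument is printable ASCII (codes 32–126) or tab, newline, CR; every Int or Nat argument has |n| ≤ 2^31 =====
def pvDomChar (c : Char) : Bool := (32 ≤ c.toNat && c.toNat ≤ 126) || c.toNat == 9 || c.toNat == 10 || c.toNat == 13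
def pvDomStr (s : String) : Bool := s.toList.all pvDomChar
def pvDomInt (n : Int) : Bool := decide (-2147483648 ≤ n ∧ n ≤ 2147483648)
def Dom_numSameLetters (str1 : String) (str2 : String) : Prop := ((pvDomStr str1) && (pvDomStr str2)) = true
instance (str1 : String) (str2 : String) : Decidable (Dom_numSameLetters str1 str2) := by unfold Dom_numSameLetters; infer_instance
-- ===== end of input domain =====

-- B replaces A's match-and-decrement scan of str2 by two frequency tables and a
-- sum of min(count1, count2) over the distinct characters of str1 (objective: simpler).

-- ===== PORT A =====
def numSameLetters (str1 : String) (str2 : String) : Int :=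
  let d := str1.toList.foldl
    (fun d c => if !(d.contains c) then d.insert c (1 : Int)
                else d.insert c (d.getD c 0 + 1)) PySem.Dict.empty
  let st := str2.toList.foldl
    (fun (st : PySem.Dict Char Int × Int) c =>
      if st.1.contains c && decide (st.1.getD c 0 > 0) then
        (st.1.insert c (st.1.getD c 0 + (-1)), st.2 + 1)
      else st) (d, (0 : Int))
  st.2

-- ===== PORT B =====
def numSameLetters_alt (str1 : String) (str2 : String) : Int :=
  let c1 := str1.toList.foldl (fun d c => d.insert c (d.getD c 0 + 1)) PySem.Dict.empty
  let c2 := str2.toList.foldl (fun d c => d.insert c (d.getD c 0 + 1)) PySem.Dict.empty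
  c1.keys.foldl (fun t k => t + min (c1.getD k 0) (c2.getD k 0)) 0

-- ===== PRECONDITION & SPEC =====
def Spec_numSameLetters (str1 : String) (str2 : String) (out : Int) : Prop := out = numSameLetters_alt str1 str2
instance (str1 : String) (str2 : String) (out : Int) : Decidable (Spec_numSameLetters str1 str2 out) := by unfold Spec_numSameLetters; infer_instance

-- ===== CLAIM (what is proved, stated in full; the proofs are below) =====
def Claim_equal_numSameLetters : Prop := ∀ (str1 : String) (str2 : String), Dom_numSameLetters str1 str2 → Spec_numSameLetters str1 str2 (numSameLetters str1 str2)

-- ===== LEMMAS AND PROOFS =====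

-- A's first loop is extensionally the standard counting fold.
theorem pvStepA_eq :
    (fun (d : PySem.Dict Char Int) c => if !(d.contains c) then d.insert c (1 : Int)
        else d.insert c (d.getD c 0 + 1))
    = fun (d : PySem.Dict Char Int) c => d.insert c (d.getD c 0 + 1) := by
  funext d c
  by_cases h : d.contains c = true
  · simp [h]
  · have h0 : d.getD c 0 = 0 :=
      PySem.Dict.getD_of_not_contains d 0 (by simpa using h)
    simp [h, h0]

theorem pvGetD_count (l : List Char) (k : Char) :
    (l.foldl (fun d c => d.insert c (d.getD c 0 + 1)) PySem.Dict.empty).getD k 0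
      = (l.count k : Int) := by
  simpa using PySem.Dict.getD_foldl_insert_add_one l PySem.Dict.empty k

-- the characters A's second loop can touch with a positive count are in d
theorem pvContains_of_pos (d : PySem.Dict Char Int) (c : Char) (h : 0 < d.getD c 0) :
    d.contains c = true := by
  by_contra hc
  have : d.getD c 0 = 0 :=
    PySem.Dict.getD_of_not_contains d 0 (by simpa using hc)
  omega

-- invariant of A's second loop: it adds min(remaining count, count in the rest of str2), summed over F
theorem pvLoopA_sum (F : Finset Char) :
    ∀ (l : List Char) (d : PySem.Dict Char Int) (n : Int),
      (∀ c, 0 ≤ d.getD c 0) → (∀ c, d.getD c 0 ≠ 0 → c ∈ F) → (∀ c ∈ l, c ∈ F) →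
      (l.foldl
        (fun (st : PySem.Dict Char Int × Int) c =>
          if st.1.contains c && decide (st.1.getD c 0 > 0) then
            (st.1.insert c (st.1.getD c 0 + (-1)), st.2 + 1)
          else st) (d, n)).2
        = n + ∑ k ∈ F, min (d.getD k 0) ((l.count k : Int)) := by
  intro l
  induction l with
  | nil =>
      intro d n hnn _ _
      rw [List.foldl_nil]
      have h : ∑ k ∈ F, min (d.getD k 0) ((List.count k ([] : List Char) : Int)) = 0 :=
        Finset.sum_eq_zero (fun k _ => by simpa using min_eq_right (hnn k))
      rw [h]
      simp
  | cons c t ih =>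
      intro d n hnn hsup hmem
      have hcF : c ∈ F := hmem c (List.mem_cons_self)
      by_cases hpos : 0 < d.getD c 0
      · have hct : d.contains c = true := pvContains_of_pos d c hpos
        rw [List.foldl_cons]
        simp only [hct, hpos, decide_true, Bool.and_self, if_true]
        rw [ih (d.insert c (d.getD c 0 + (-1))) (n + 1)
            (by intro k
                rw [PySem.Dict.getD_insert]
                split_ifs with hk
                · omega
                · exact hnn k)
            (by intro k hk
                rw [PySem.Dict.getD_insert] at hk
                split_ifs at hk with h
                · exact h ▸ hcF
                · exact hsup k hk)
            (fun k hk => hmem k (List.mem_cons_of_mem _ hk))]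
        rw [← Finset.sum_erase_add F _ hcF, ← Finset.sum_erase_add F _ hcF]
        have hsame : ∀ k ∈ F.erase c,
            min ((d.insert c (d.getD c 0 + (-1))).getD k 0) ((t.count k : Int))
              = min (d.getD k 0) (((c :: t).count k : Int)) := by
          intro k hk
          have hkc : k ≠ c := Finset.ne_of_mem_erase hk
          rw [PySem.Dict.getD_insert_of_ne d _ _ hkc]
          simp [Ne.symm hkc]
        rw [Finset.sum_congr rfl hsame]
        have : min ((d.insert c (d.getD c 0 + (-1))).getD c 0) ((t.count c : Int)) + 1
            = min (d.getD c 0) (((c :: t).count c : Int)) := by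
          rw [PySem.Dict.getD_insert_self]
          simp
          omega
        omega
      · have h0 : d.getD c 0 = 0 := by have := hnn c; omega
        rw [List.foldl_cons]
        have hcond : (d.contains c && decide (d.getD c 0 > 0)) = false := by
          simp [h0]
        simp only [hcond, Bool.false_eq_true, if_false]
        rw [ih d n hnn hsup (fun k hk => hmem k (List.mem_cons_of_mem _ hk))]
        rw [← Finset.sum_erase_add F _ hcF, ← Finset.sum_erase_add F _ hcF]
        have hsame : ∀ k ∈ F.erase c,
            min (d.getD k 0) ((t.count k : Int)) = min (d.getD k 0) (((c :: t).count k : Int)) := by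
          intro k hk
          have hkc : k ≠ c := Finset.ne_of_mem_erase hk
          simp [Ne.symm hkc]
        rw [Finset.sum_congr rfl hsame]
        have : min (d.getD c 0) ((t.count c : Int)) = min (d.getD c 0) (((c :: t).count c : Int)) := by
          rw [h0]
          simp [min_def]
          omega
        omega

-- generic: B's accumulation fold is a list sum
theorem pvFoldl_add_sum (f : Char → Int) :
    ∀ (l : List Char) (t : Int), l.foldl (fun t k => t + f k) t = t + (l.map f).sum := by
  intro l
  induction l with
  | nil => intro t; simp
  | cons c r ih => intro t; rw [List.foldl_cons, ih]; simp; ring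

-- A's value in closed form
theorem pvA_closed (str1 str2 : String) :
    numSameLetters str1 str2
      = ∑ k ∈ (str1.toList ++ str2.toList).toFinset,
          min ((str1.toList.count k : Int)) ((str2.toList.count k : Int)) := by
  show (str2.toList.foldl
      (fun (st : PySem.Dict Char Int × Int) c =>
        if st.1.contains c && decide (st.1.getD c 0 > 0) then
          (st.1.insert c (st.1.getD c 0 + (-1)), st.2 + 1)
        else st)
      (str1.toList.foldl
        (fun d c => if !(d.contains c) then d.insert c (1 : Int)
                    else d.insert c (d.getD c 0 + 1)) PySem.Dict.empty, (0 : Int))).2 = _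
  rw [pvStepA_eq]
  rw [pvLoopA_sum ((str1.toList ++ str2.toList).toFinset) str2.toList _ 0
      (by intro c; rw [pvGetD_count]; exact Int.natCast_nonneg _)
      (by intro c hc
          rw [pvGetD_count] at hc
          have : c ∈ str1.toList := by
            by_contra h
            simp [List.count_eq_zero_of_not_mem h] at hc
          simp [List.mem_toFinset]
          exact Or.inl this)
      (by intro c hc
          simp [List.mem_toFinset]
          exact Or.inr hc)]
  simp only [zero_add]
  refine Finset.sum_congr rfl ?_
  intro k _
  rw [pvGetD_count]

-- B's value in closed form
theorem pvB_closed (str1 str2 : String) :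
    numSameLetters_alt str1 str2
      = ∑ k ∈ (str1.toList ++ str2.toList).toFinset,
          min ((str1.toList.count k : Int)) ((str2.toList.count k : Int)) := by
  unfold numSameLetters_alt
  rw [pvFoldl_add_sum]
  simp only [PySem.Dict.keys_foldl_insert, PySem.Dict.keys_empty, PySem.Set.update_nil_left]
  have hnd : (PySem.Set.ofList str1.toList).Nodup := PySem.Set.nodup_ofList _
  rw [← List.sum_toFinset _ hnd]
  have htf : (PySem.Set.ofList str1.toList).toFinset = str1.toList.toFinset := by
    ext x
    simp [List.mem_toFinset, PySem.Set.mem_ofList]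
  rw [htf]
  simp only [PySem.Dict.getD_foldl_insert_add_one, PySem.Dict.getD_empty, zero_add]
  have hzero : ∀ k ∈ (str1.toList ++ str2.toList).toFinset, k ∉ str1.toList.toFinset →
      min ((str1.toList.count k : Int)) ((str2.toList.count k : Int)) = 0 := by
    intro k _ hk
    rw [List.mem_toFinset] at hk
    rw [List.count_eq_zero_of_not_mem hk]
    push_cast
    exact min_eq_left (Int.natCast_nonneg (str2.toList.count k))
  rw [Finset.sum_subset (by intro x hx; simp only [List.mem_toFinset] at *; simp [hx]) hzero]

-- ===== VERDICT (by name: the statement is the Claim_ definition above) =====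
theorem numSameLetters_spec : Claim_equal_numSameLetters := by
  intro str1 str2 _
  unfold Spec_numSameLetters
  rw [pvA_closed, pvB_closed]
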